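-- pv_equiv track=rewrite | github.com/JUMINAHN/TIL | 0815/swea/swea1209.py | rowcol
-- ===== SOURCE A (Python) =====
-- def rowcol(arr, N):
--     max = 0
--     for row in range(N):
--         col_max = 0
--         row_max = 0
--         for col in range(N):
--             col_max += arr[row][col]
--             row_max += arr[col][row]
--
--         if max < col_max:
--             max = col_max
--         if max < row_max:
--             max = row_max
--     return max
-- ===== SOURCE B (Python) =====
-- def rowcol(arr, N):
--     n = N if N > 0 else 0
--     best = 0
--     cols = [0] * n
--     for row in arr[:n]:
--         r = row[:n]
--         s = sum(r)
--         if best < s: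
--             best = s
--         cols = [c + v for c, v in zip(cols, r)]
--     for c in cols:
--         if best < c:
--             best = c
--     return best
-- ===== Notes on version B (the rewrite author's own statement) =====
-- stated objective: alternative
-- what changed: A walks the index grid twice per cell (arr[row][col] and the transposed arr[col][row]) inside one nested loop; B makes a single streaming pass over the first n rows, maintaining a running vector of column sums by elementwise zip-addition and the best row sum as it goes, then scans that vector once - each matrix element is read exactly once and no transposed indexing occurs.
import Mathlib
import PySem

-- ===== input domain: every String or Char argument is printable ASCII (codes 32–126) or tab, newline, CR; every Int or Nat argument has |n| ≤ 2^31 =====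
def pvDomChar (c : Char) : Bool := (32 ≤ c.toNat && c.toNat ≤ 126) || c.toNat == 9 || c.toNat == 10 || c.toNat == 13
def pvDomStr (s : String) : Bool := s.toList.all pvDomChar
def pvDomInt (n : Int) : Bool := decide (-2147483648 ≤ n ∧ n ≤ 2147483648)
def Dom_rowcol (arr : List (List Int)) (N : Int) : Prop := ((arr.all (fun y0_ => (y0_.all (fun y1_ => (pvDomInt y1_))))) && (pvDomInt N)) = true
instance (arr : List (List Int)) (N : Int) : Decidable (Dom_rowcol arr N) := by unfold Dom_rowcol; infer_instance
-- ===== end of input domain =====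

-- B replaces A's doubly-indexed nested loop (which reads each cell twice, once transposed)
-- by one streaming pass over the rows that keeps a running column-sum vector via zip-addition
-- and the best row sum, then one scan of that vector (objective: alternative; no speed claim).

-- ===== PORT A =====
def rowcol (arr : List (List Int)) (N : Int) : Int :=
  (PySem.List.pyRange 0 N 1).foldl (fun m row =>
    let p := (PySem.List.pyRange 0 N 1).foldl
      (fun (s : Int × Int) col =>
        (s.1 + PySem.List.pyGetD (PySem.List.pyGetD arr row []) col 0,
         s.2 + PySem.List.pyGetD (PySem.List.pyGetD arr col []) row 0)) (0, 0)
    let m1 := if m < p.1 then p.1 else m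
    if m1 < p.2 then p.2 else m1) 0

-- ===== PORT B =====
def rowcol_alt (arr : List (List Int)) (N : Int) : Int :=
  let n : Int := if 0 < N then N else 0
  let st := (PySem.List.slice arr none (some n)).foldl
    (fun (s : Int × List Int) row =>
      let r := PySem.List.slice row none (some n)
      let best := if s.1 < r.sum then r.sum else s.1
      (best, (s.2.zip r).map (fun p => p.1 + p.2)))
    (0, List.replicate n.toNat 0)
  st.2.foldl (fun b c => if b < c then c else b) st.1

-- ===== PRECONDITION & SPEC =====
-- exactly where Python A returns: the top-left N×N block must exist (otherwise IndexError)
def Pre_rowcol (arr : List (List Int)) (N : Int) : Prop :=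
  N ≤ (arr.length : Int) ∧ ∀ r ∈ arr.take N.toNat, N ≤ (r.length : Int)
instance (arr : List (List Int)) (N : Int) : Decidable (Pre_rowcol arr N) := by
  unfold Pre_rowcol; infer_instance
def pvWitness_rowcol : List (List Int) × Int := ([[1, -2], [3, 4]], 2)

def Spec_rowcol (arr : List (List Int)) (N : Int) (out : Int) : Prop := out = rowcol_alt arr N
instance (arr : List (List Int)) (N : Int) (out : Int) : Decidable (Spec_rowcol arr N out) := by
  unfold Spec_rowcol; infer_instance

-- ===== CLAIM (what is proved, stated in full; the proofs are below) =====
def Claim_equal_rowcol : Prop := ∀ (arr : List (List Int)) (N : Int),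
  Dom_rowcol arr N → Pre_rowcol arr N → Spec_rowcol arr N (rowcol arr N)

-- ===== LEMMAS AND PROOFS =====

theorem foldl_if_max (l : List Int) (a : Int) :
    l.foldl (fun b c => if b < c then c else b) a = l.foldl max a := by
  apply PySem.List.foldl_congr_mem
  intro acc x _
  split_ifs <;> omega

theorem foldl_max_max (l : List Int) (a b : Int) :
    l.foldl max (max a b) = max (l.foldl max a) b := by
  induction l generalizing a with
  | nil => rfl
  | cons x t ih =>
    simp only [List.foldl_cons]
    rw [show max (max a b) x = max (max a x) b by omega, ih]

theorem interleave_max (l : List Nat) (f g : Nat → Int) (init : Int) :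
    l.foldl (fun m i => max (max m (f i)) (g i)) init
      = (l.map g).foldl max ((l.map f).foldl max init) := by
  induction l generalizing init with
  | nil => rfl
  | cons a t ih =>
    simp only [List.foldl_cons, List.map_cons, ih, foldl_max_max]

theorem map_range_getD (l : List Int) (d : Int) (n : Nat) (h : n ≤ l.length) :
    (List.range n).map (fun k => l.getD k d) = l.take n := by
  apply List.ext_getElem
  · simp [h]
  · intro i h1 h2
    simp only [List.getElem_map, List.getElem_range, List.getElem_take]
    rw [List.getD_eq_getElem]

theorem map_range_getD' (l : List (List Int)) (n : Nat) (h : n ≤ l.length) :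
    (List.range n).map (fun k => l.getD k []) = l.take n := by
  apply List.ext_getElem
  · simp [h]
  · intro i h1 h2
    simp only [List.getElem_map, List.getElem_range, List.getElem_take]
    rw [List.getD_eq_getElem]

theorem take_getD (l : List Int) (n c : Nat) (hc : c < n) :
    (l.take n).getD c 0 = l.getD c 0 := by
  simp only [List.getD_eq_getElem?_getD, List.getElem?_take, if_pos hc]

-- the zip-addition fold over rows of length n computes the pointwise column sums
theorem colfold (rows : List (List Int)) (n : Nat)
    (h : ∀ r ∈ rows, r.length = n) (c : List Int) (hc : c.length = n) :
    rows.foldl (fun c r => (c.zip r).map (fun p => p.1 + p.2)) c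
      = (List.range n).map (fun j => c.getD j 0 + (rows.map (fun r => r.getD j 0)).sum) := by
  induction rows generalizing c with
  | nil =>
    simp only [List.foldl_nil, List.map_nil, List.sum_nil, add_zero]
    apply List.ext_getElem
    · simp [hc]
    · intro i h1 h2
      simp only [List.getElem_map, List.getElem_range]
      rw [List.getD_eq_getElem]
  | cons r t ih =>
    simp only [List.foldl_cons]
    have hr : r.length = n := h r List.mem_cons_self
    have hc' : ((c.zip r).map (fun p => p.1 + p.2)).length = n := by
      simp [hc, hr]
    rw [ih (fun x hx => h x (List.mem_cons_of_mem _ hx)) _ hc']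
    apply List.map_congr_left
    intro j hj
    have hjn : j < n := List.mem_range.mp hj
    have : ((c.zip r).map (fun p => p.1 + p.2)).getD j 0 = c.getD j 0 + r.getD j 0 := by
      rw [List.getD_eq_getElem _ _ (by omega : j < ((c.zip r).map (fun p => p.1 + p.2)).length),
          List.getD_eq_getElem _ _ (by omega : j < c.length),
          List.getD_eq_getElem _ _ (by omega : j < r.length)]
      simp [List.getElem_zip]
    simp only [this, List.map_cons, List.sum_cons]
    ring

theorem rowcol_spec : Claim_equal_rowcol := by
  intro arr N _dom hpre
  obtain ⟨h1, h2⟩ := hpre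
  unfold Spec_rowcol rowcol rowcol_alt
  set n := N.toNat with hn
  have hnlen : n ≤ arr.length := by omega
  have hrow : ∀ r ∈ arr.take n, n ≤ r.length := by
    intro r hr; have := h2 r hr; omega
  have hmem : ∀ i, i < n → arr.getD i [] ∈ arr.take n := by
    intro i hi
    have he : arr.getD i [] = (arr.take n).getD i [] := by
      simp [List.getD_eq_getElem?_getD, hi]
    rw [he, List.getD_eq_getElem _ _ (by simp; omega)]
    exact List.getElem_mem _
  have hR : PySem.List.pyRange 0 N 1 = (List.range n).map (fun (k : Nat) => (k : Int)) := by
    rw [PySem.List.pyRange_one, sub_zero, ← hn]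
    exact List.map_congr_left (fun k _ => zero_add _)
  rw [hR]
  simp only [List.foldl_map]
  -- A side: each outer step is max (max m (row-sum i)) (col-sum i)
  rw [PySem.List.foldl_congr_mem _ _
      (fun m i => max (max m (((arr.getD i []).take n).sum))
        (((arr.take n).map (fun r => r.getD i 0)).sum)) 0 ?hstep]
  case hstep =>
    intro acc i hi
    have hi' : i < n := List.mem_range.mp hi
    simp only [PySem.List.pyGetD_natCast]
    rw [PySem.List.foldl_prod_mk (fun a y => a + (arr.getD i []).getD y 0)
        (fun a y => a + (arr.getD y []).getD i 0)]
    simp only [PySem.List.foldl_add, zero_add]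
    rw [map_range_getD _ 0 n (hrow _ (hmem i hi')),
        show (List.range n).map (fun k => (arr.getD k []).getD i 0)
          = ((List.range n).map (fun k => arr.getD k [])).map (fun r => r.getD i 0) by
          rw [List.map_map]; rfl,
        map_range_getD' arr n hnlen]
    show (if _ < _ then _ else _) = _
    split_ifs <;> omega
  rw [interleave_max]
  -- B side
  have hb0 : (0:Int) ≤ if 0 < N then N else 0 := by split_ifs <;> omega
  have hbn : (if (0:Int) < N then N else 0).toNat = n := by split_ifs <;> omega
  simp only [PySem.List.slice_to _ hb0, hbn]
  -- the pair fold splits into two independent folds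
  rw [PySem.List.foldl_prod_mk
      (f := fun (b : Int) (row : List Int) => if b < (row.take n).sum then (row.take n).sum else b)
      (g := fun (c : List Int) (row : List Int) => (c.zip (row.take n)).map (fun p => p.1 + p.2))]
  rw [foldl_if_max]
  -- best component: fold of max over row sums
  have hbest : (arr.take n).foldl
      (fun (b : Int) row => if b < (row.take n).sum then (row.take n).sum else b) 0
      = (arr.take n).foldl (fun b row => max b (row.take n).sum) 0 := by
    apply PySem.List.foldl_congr_mem
    intro acc x _
    split_ifs <;> omega
  rw [hbest]
  -- cols component
  have hcols : (arr.take n).foldl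
      (fun (c : List Int) row => (c.zip (row.take n)).map (fun p => p.1 + p.2))
      (List.replicate n 0)
      = (List.range n).map (fun j => ((arr.take n).map (fun r => r.getD j 0)).sum) := by
    have := colfold ((arr.take n).map (fun r => r.take n)) n
      (by intro r hr; simp only [List.mem_map] at hr; obtain ⟨x, hx, rfl⟩ := hr
          simp [hrow x hx])
      (List.replicate n 0) (by simp)
    rw [List.foldl_map] at this
    rw [this]
    apply List.map_congr_left
    intro j hj
    have hjn : j < n := List.mem_range.mp hj
    rw [List.getD_eq_getElem _ _ (by simp; omega : j < (List.replicate n (0:Int)).length)]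
    simp only [List.getElem_replicate, zero_add, List.map_map, Function.comp_def]
    congr 1
    exact List.map_congr_left (fun r _ => take_getD r n j hjn)
  rw [hcols]
  -- align the two sides
  rw [show (List.range n).map (fun i => ((arr.getD i []).take n).sum)
        = ((List.range n).map (fun i => arr.getD i [])).map (fun r => (r.take n).sum) by
        rw [List.map_map]; rfl, map_range_getD' arr n hnlen]
  simp only [List.foldl_map]

-- ===== VERDICT (by name: the statement is the Claim_ definition above) =====
-- (rowcol_spec above proves Claim_equal_rowcol)
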